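-- pv_equiv track=rewrite | github.com/w1gglyw0bbly/Random-Stuff | MSTest.py | inputBombs
-- ===== SOURCE A (Python) =====
-- def inputBombs(blankBoard, bombs):
--     for k in range(len(bombs)):
--         for i in range(len(blankBoard)):
--             for j in range(len(blankBoard[i])):
--                 if i == bombs[k][0] and j == bombs[k][1]:
--                     blankBoard[i][j] = 'B'
--     boardWBombs = blankBoard
--     return boardWBombs
-- ===== SOURCE B (Python) =====
-- def inputBombs(blankBoard, bombs):
--     # One indexed pass over the board; bomb coordinates indexed into a set once.
--     targets = {(b[0], b[1]) for b in bombs}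
--     for i, row in enumerate(blankBoard):
--         for j in range(len(row)):
--             if (i, j) in targets:
--                 row[j] = 'B'
--     return blankBoard
-- ===== Notes on version B (the rewrite author's own statement) =====
-- stated objective: faster
-- what changed: Instead of rescanning the entire board once per bomb (A's triple loop over bombs x rows x cols), B collects the bomb coordinates into a set once and makes a single pass over the board, marking a cell when its (i,j) index is in the set; out-of-range/negative coordinates simply never match, as in A.
import Mathlib
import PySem

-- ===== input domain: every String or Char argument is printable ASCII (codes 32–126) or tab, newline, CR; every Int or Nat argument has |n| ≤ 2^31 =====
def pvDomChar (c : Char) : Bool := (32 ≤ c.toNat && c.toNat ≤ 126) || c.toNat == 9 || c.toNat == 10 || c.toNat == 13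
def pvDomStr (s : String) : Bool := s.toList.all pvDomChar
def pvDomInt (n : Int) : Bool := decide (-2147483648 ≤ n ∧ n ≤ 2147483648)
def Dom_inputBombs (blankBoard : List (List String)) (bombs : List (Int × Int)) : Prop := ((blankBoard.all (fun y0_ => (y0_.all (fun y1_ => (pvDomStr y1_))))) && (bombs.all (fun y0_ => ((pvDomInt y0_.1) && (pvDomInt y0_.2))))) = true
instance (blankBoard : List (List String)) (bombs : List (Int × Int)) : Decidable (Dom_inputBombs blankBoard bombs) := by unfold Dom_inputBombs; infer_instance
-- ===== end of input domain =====

-- B replaces A's per-bomb rescan of the whole board by one set of bomb coordinates and a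
-- single indexed pass over the board (objective: faster, O(K+R*C) vs O(K*R*C)).
-- Both Pythons mutate blankBoard in place and return it; the equivalence proved is about the return value.

-- ===== PORT A =====
def inputBombs (blankBoard : List (List String)) (bombs : List (Int × Int)) : List (List String) :=
  (List.range bombs.length).foldl (fun bd k =>
    let b := bombs.getD k ((0 : Int), (0 : Int))
    (List.range bd.length).foldl (fun bd2 i =>
      (List.range (bd2.getD i []).length).foldl (fun bd3 (j : Nat) =>
        if (i : Int) = b.1 ∧ (j : Int) = b.2 then
          bd3.set i ((bd3.getD i []).set j "B")
        else bd3) bd2) bd) blankBoard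

-- ===== PORT B =====
def inputBombs_alt (blankBoard : List (List String)) (bombs : List (Int × Int)) : List (List String) :=
  let targets : PySem.Set (Int × Int) := PySem.Set.ofList bombs
  blankBoard.mapIdx (fun i row =>
    row.mapIdx (fun j c =>
      if PySem.Set.contains targets ((i : Int), (j : Int)) then "B" else c))

-- ===== PRECONDITION & SPEC =====
def Spec_inputBombs (blankBoard : List (List String)) (bombs : List (Int × Int)) (out : List (List String)) : Prop := out = inputBombs_alt blankBoard bombs
instance (blankBoard : List (List String)) (bombs : List (Int × Int)) (out : List (List String)) : Decidable (Spec_inputBombs blankBoard bombs out) := by unfold Spec_inputBombs; infer_instance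

-- ===== CLAIM (what is proved, stated in full; the proofs are below) =====
def Claim_equal_inputBombs : Prop := ∀ (blankBoard : List (List String)) (bombs : List (Int × Int)), Dom_inputBombs blankBoard bombs → Spec_inputBombs blankBoard bombs (inputBombs blankBoard bombs)

-- ===== LEMMAS AND PROOFS =====

-- the canonical cell-wise description both ports are reduced to
def markAll (bombs : List (Int × Int)) (bd : List (List String)) : List (List String) :=
  bd.mapIdx (fun i row => row.mapIdx (fun j c =>
    if ((i : Int), (j : Int)) ∈ bombs then "B" else c))

-- fold over range(len l) indexing with getD = fold over l
theorem foldl_range_getD {β γ : Type} (g : γ → β → γ) (d : β) :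
    ∀ (l pre : List β) (init : γ),
      (List.range' pre.length l.length).foldl (fun acc k => g acc ((pre ++ l).getD k d)) init
        = l.foldl g init := by
  intro l
  induction l with
  | nil => intro pre init; simp
  | cons a t ih =>
    intro pre init
    have h1 : (pre ++ a :: t).getD pre.length d = a := by
      simp [List.getD]
    have h2 : pre ++ a :: t = (pre ++ [a]) ++ t := by simp
    simp only [List.length_cons, List.range'_succ, List.foldl_cons, h1]
    have := ih (pre ++ [a]) (g init a)
    simp only [List.length_append, List.length_cons, List.length_nil] at this
    rw [h2]
    simpa using this

-- row-level loop = mapIdx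
theorem rowFold_eq_mapIdx (c : Nat → Prop) [DecidablePred c] :
    ∀ (l pre : List String),
      (List.range' pre.length l.length).foldl
          (fun r j => if c j then r.set j "B" else r) (pre ++ l)
        = pre ++ l.mapIdx (fun j a => if c (pre.length + j) then "B" else a) := by
  intro l
  induction l with
  | nil => intro pre; simp
  | cons a t ih =>
    intro pre
    simp only [List.length_cons, List.range'_succ, List.foldl_cons, List.mapIdx_cons]
    have hset : ∀ v : String, (pre ++ a :: t).set pre.length v = pre ++ v :: t := by
      intro v
      rw [List.set_append]
      simp
    have hstep : (if c pre.length then (pre ++ a :: t).set pre.length "B" else pre ++ a :: t)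
        = pre ++ (if c pre.length then "B" else a) :: t := by
      by_cases h : c pre.length <;> simp [h, hset]
    rw [hstep]
    have h2 : pre ++ (if c pre.length then "B" else a) :: t
        = (pre ++ [if c pre.length then "B" else a]) ++ t := by simp
    rw [h2]
    have := ih (pre ++ [if c pre.length then "B" else a])
    simp only [List.length_append, List.length_cons, List.length_nil] at this
    rw [this]
    simp [List.append_assoc, Nat.add_assoc, Nat.add_comm 1]

-- inner j-loop localised to row i (i strictly inside the board)
theorem colFold_set (c : Nat → Prop) [DecidablePred c] (i : Nat) :
    ∀ (n : Nat) (bd : List (List String)), i < bd.length →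
      (List.range n).foldl
          (fun bd3 j => if c j then bd3.set i ((bd3.getD i []).set j "B") else bd3) bd
        = bd.set i ((List.range n).foldl (fun r j => if c j then r.set j "B" else r)
            (bd.getD i [])) := by
  intro n
  induction n with
  | zero =>
    intro bd hi
    simp [List.getD, List.getElem?_eq_getElem hi, List.set_getElem_self]
  | succ m ih =>
    intro bd hi
    rw [List.range_succ]
    simp only [List.foldl_append, List.foldl_cons, List.foldl_nil]
    rw [ih bd hi]
    set r := (List.range m).foldl (fun r j => if c j then r.set j "B" else r) (bd.getD i [])
    have hget : ((bd.set i r)[i]?.getD []) = r := by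
      rw [List.getElem?_set_self]
      · simp
      · simpa using hi
    by_cases h : c m
    · simp only [h, if_pos, List.getD] at *
      rw [hget, List.set_set]
    · simp [h]

-- one bomb's full board scan = cell-wise mapIdx
theorem boardFold_eq (c : Nat → Nat → Prop) [∀ i j, Decidable (c i j)] :
    ∀ (l pre : List (List String)),
      (List.range' pre.length l.length).foldl (fun bd2 i =>
          (List.range (bd2.getD i []).length).foldl (fun bd3 j =>
            if c i j then bd3.set i ((bd3.getD i []).set j "B") else bd3) bd2)
        (pre ++ l)
      = pre ++ l.mapIdx (fun t row => row.mapIdx (fun j a =>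
          if c (pre.length + t) j then "B" else a)) := by
  intro l
  induction l with
  | nil => intro pre; simp
  | cons row rest ih =>
    intro pre
    simp only [List.length_cons, List.range'_succ, List.foldl_cons, List.mapIdx_cons]
    have hlen : pre.length < (pre ++ row :: rest).length := by simp
    have hget : (pre ++ row :: rest).getD pre.length [] = row := by
      simp [List.getD]
    rw [colFold_set (c pre.length) pre.length _ _ hlen, hget]
    have hrow := rowFold_eq_mapIdx (c pre.length) row []
    simp only [List.length_nil, List.nil_append, ← List.range_eq_range', Nat.zero_add] at hrow
    rw [hrow]
    have hset : (pre ++ row :: rest).set pre.length (row.mapIdx (fun j a => if c pre.length j then "B" else a)) = (pre ++ [row.mapIdx (fun j a => if c pre.length j then "B" else a)]) ++ rest := by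
      rw [List.set_append]; simp
    rw [hset]
    have h3 := ih (pre ++ [row.mapIdx (fun j a => if c pre.length j then "B" else a)])
    simp only [List.length_append, List.length_cons, List.length_nil] at h3
    rw [h3]
    simp [List.append_assoc, Nat.add_assoc, Nat.add_comm 1]

theorem mapIdx_mapIdx {α : Type} (f g : Nat → α → α) (l : List α) :
    (l.mapIdx g).mapIdx f = l.mapIdx (fun i a => f i (g i a)) := by
  apply List.ext_getElem <;> simp

theorem foldl_bombs_eq (bombs : List (Int × Int)) :
    ∀ bd : List (List String),
      bombs.foldl (fun bd b =>
        bd.mapIdx (fun i row => row.mapIdx (fun j a =>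
          if (i : Int) = b.1 ∧ (j : Int) = b.2 then "B" else a))) bd
      = markAll bombs bd := by
  induction bombs with
  | nil =>
    intro bd
    simp only [List.foldl_nil, markAll, List.not_mem_nil, if_false]
    apply List.ext_getElem
    · simp
    · intro i h1 h2
      simp only [List.getElem_mapIdx]
      apply List.ext_getElem <;> simp
  | cons b rest ih =>
    intro bd
    simp only [List.foldl_cons]
    rw [ih, markAll, markAll, mapIdx_mapIdx]
    congr 1
    funext i row
    rw [mapIdx_mapIdx]
    congr 1
    funext j a
    by_cases hr : ((i : Int), (j : Int)) ∈ rest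
    · simp [hr]
    · by_cases hb : (i : Int) = b.1 ∧ (j : Int) = b.2
      · have : ((i : Int), (j : Int)) = b := Prod.ext hb.1 hb.2
        simp [hb]
      · have : ¬ ((i : Int), (j : Int)) = b := by
          intro h; exact hb ⟨congrArg Prod.fst h, congrArg Prod.snd h⟩
        simp [hb]
        simp [this]

theorem inputBombs_eq_markAll (blankBoard : List (List String)) (bombs : List (Int × Int)) :
    inputBombs blankBoard bombs = markAll bombs blankBoard := by
  have hfun : (fun bd (b : Int × Int) =>
      (List.range bd.length).foldl (fun bd2 (i : Nat) =>
        (List.range (bd2.getD i []).length).foldl (fun bd3 (j : Nat) =>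
          if (i : Int) = b.1 ∧ (j : Int) = b.2 then
            bd3.set i ((bd3.getD i []).set j "B")
          else bd3) bd2) bd)
      = (fun (bd : List (List String)) (b : Int × Int) =>
          bd.mapIdx (fun i row => row.mapIdx (fun j a =>
            if (i : Int) = b.1 ∧ (j : Int) = b.2 then "B" else a))) := by
    funext bd b
    have := boardFold_eq (fun i j => (i : Int) = b.1 ∧ (j : Int) = b.2) bd []
    simp only [List.length_nil, List.nil_append, ← List.range_eq_range', Nat.zero_add] at this
    exact this
  have hk := foldl_range_getD
    (fun bd (b : Int × Int) =>
      (List.range bd.length).foldl (fun bd2 (i : Nat) =>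
        (List.range (bd2.getD i []).length).foldl (fun bd3 (j : Nat) =>
          if (i : Int) = b.1 ∧ (j : Int) = b.2 then
            bd3.set i ((bd3.getD i []).set j "B")
          else bd3) bd2) bd)
    ((0 : Int), (0 : Int)) bombs [] blankBoard
  simp only [List.length_nil, List.nil_append, ← List.range_eq_range'] at hk
  exact hk.trans ((congrArg (fun g => List.foldl g blankBoard bombs) hfun).trans
    (foldl_bombs_eq bombs blankBoard))

theorem alt_eq_markAll (blankBoard : List (List String)) (bombs : List (Int × Int)) :
    inputBombs_alt blankBoard bombs = markAll bombs blankBoard := by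
  unfold inputBombs_alt markAll
  dsimp only
  congr 1
  funext i row
  congr 1
  funext j c
  by_cases h : ((i : Int), (j : Int)) ∈ bombs
  · simp [PySem.Set.mem_ofList, h]
  · simp [PySem.Set.mem_ofList, h]

-- ===== VERDICT (by name: the statement is the Claim_ definition above) =====
theorem inputBombs_spec : Claim_equal_inputBombs := by
  intro blankBoard bombs _
  unfold Spec_inputBombs
  rw [inputBombs_eq_markAll, alt_eq_markAll]
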